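-- pv_equiv track=rewrite | github.com/BlessedCow/pharmds | rules/composite_rules.py | _label_for_mechs
-- ===== SOURCE A (Python) =====
-- def _label_for_mechs(mechs: set[str]) -> str:
--     # Pretty label for name/rationale
--     order = ["cyp", "ugt", "pgp"]
--     pretty = {
--         "cyp": "CYP",
--         "ugt": "UGT",
--         "pgp": "P-gp",
--     }
--     parts: list[str] = []
--     for k in order:
--         if k in mechs:
--             parts.append(pretty[k])
--
--     # include any other transporters we might add later
--     extras = sorted(m for m in mechs if m not in set(order))
--     parts.extend(extras)
--
--     return " + ".join(parts) if parts else "multiple PK"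
-- ===== SOURCE B (Python) =====
-- def _label_for_mechs(mechs: set[str]) -> str:
--     pretty = {"cyp": "CYP", "ugt": "UGT", "pgp": "P-gp"}
--     rank = {"cyp": 0, "ugt": 1, "pgp": 2}
--     parts = [pretty.get(m, m) for m in sorted(mechs, key=lambda m: (rank.get(m, 3), m))]
--     return " + ".join(parts) if parts else "multiple PK"
-- ===== Notes on version B (the rewrite author's own statement) =====
-- stated objective: idiomatic
-- what changed: A's two-phase build (membership loop over the fixed order list appending pretty names, then a separate sort of the extras, then concatenation) is replaced by one sort of the whole set under the composite key (rank, name) followed by a uniform pretty-lookup mapping pass.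
import Mathlib
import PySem

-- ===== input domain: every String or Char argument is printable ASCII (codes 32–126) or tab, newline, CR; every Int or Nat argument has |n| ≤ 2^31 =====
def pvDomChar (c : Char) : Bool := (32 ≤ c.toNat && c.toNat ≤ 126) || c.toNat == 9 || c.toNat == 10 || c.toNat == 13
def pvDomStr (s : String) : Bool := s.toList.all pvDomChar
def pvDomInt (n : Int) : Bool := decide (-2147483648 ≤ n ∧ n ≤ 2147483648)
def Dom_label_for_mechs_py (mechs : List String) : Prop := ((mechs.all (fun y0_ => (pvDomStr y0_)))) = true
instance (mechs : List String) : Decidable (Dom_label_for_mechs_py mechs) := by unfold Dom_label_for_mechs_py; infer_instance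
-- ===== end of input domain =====

-- B replaces A's two-phase build (membership loop over the fixed order, then a separate
-- sort of the extras) by ONE priority-keyed sort of the whole set followed by a uniform
-- pretty-mapping pass (objective: idiomatic).

-- ===== PORT A =====
def label_for_mechs_py (mechs : List String) : String :=
  let order : List String := ["cyp", "ugt", "pgp"]
  let pretty : PySem.Dict String String := ⟨[("cyp", "CYP"), ("ugt", "UGT"), ("pgp", "P-gp")]⟩
  -- for k in order: if k in mechs: parts.append(pretty[k])
  -- (pretty[k] cannot raise: k only ranges over pretty's keys, so get? is some; getD "" merely totalises)
  let parts : List String :=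
    order.foldl (fun acc k =>
      if PySem.Set.contains mechs k then acc ++ [(PySem.Dict.get? pretty k).getD ""] else acc) []
  -- extras = sorted(m for m in mechs if m not in set(order))
  let extras : List String :=
    PySem.List.sorted (mechs.filter (fun m => !(PySem.Set.ofList order).contains m)) (fun m => m)
  let parts2 := parts ++ extras
  if parts2 ≠ [] then PySem.Str.join " + " parts2 else "multiple PK"

-- ===== PORT B =====
def label_for_mechs_py_alt (mechs : List String) : String :=
  let pretty : PySem.Dict String String := ⟨[("cyp", "CYP"), ("ugt", "UGT"), ("pgp", "P-gp")]⟩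
  let rank : PySem.Dict String Int := ⟨[("cyp", (0:Int)), ("ugt", (1:Int)), ("pgp", (2:Int))]⟩
  -- parts = [pretty.get(m, m) for m in sorted(mechs, key=lambda m: (rank.get(m, 3), m))]
  let parts : List String :=
    (PySem.List.sorted2 mechs (fun m => PySem.Dict.getD rank m 3) (fun m => m)).map
      (fun m => PySem.Dict.getD pretty m m)
  if parts ≠ [] then PySem.Str.join " + " parts else "multiple PK"

-- ===== PRECONDITION & SPEC =====
-- The Python argument is a set[str]; its List port holds the DISTINCT elements, so Pre_
-- only states that the list is a valid set representation (no duplicates). It excludes no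
-- input of A's Python domain.
def Pre_label_for_mechs_py (mechs : List String) : Prop := mechs.Nodup
instance (mechs : List String) : Decidable (Pre_label_for_mechs_py mechs) := by unfold Pre_label_for_mechs_py; infer_instance
def pvWitness_label_for_mechs_py : List String := ["ugt", "abc", "cyp"]

def Spec_label_for_mechs_py (mechs : List String) (out : String) : Prop := out = label_for_mechs_py_alt mechs
instance (mechs : List String) (out : String) : Decidable (Spec_label_for_mechs_py mechs out) := by unfold Spec_label_for_mechs_py; infer_instance

-- ===== CLAIM (what is proved, stated in full; the proofs are below) =====
def Claim_equal_label_for_mechs_py : Prop := ∀ (mechs : List String), Dom_label_for_mechs_py mechs → Pre_label_for_mechs_py mechs → Spec_label_for_mechs_py mechs (label_for_mechs_py mechs)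

-- ===== LEMMAS AND PROOFS =====

-- B's tuple-key sort is the single-key sort under the lexicographic order on Int ×ₗ String.
lemma sorted2_eq_sorted_lex {α : Type} (xs : List α) (k1 : α → Int) (k2 : α → String) :
    PySem.List.sorted2 xs k1 k2 false
      = PySem.List.sorted xs (fun x => toLex (k1 x, k2 x)) false := by
  have hpred : (fun (a b : α) => decide (k1 a < k1 b) || (!decide (k1 b < k1 a) && decide (k2 a < k2 b)))
      = (fun (a b : α) => decide (toLex (k1 a, k2 a) < toLex (k1 b, k2 b))) := by
    funext a b
    simp only [Prod.Lex.toLex_lt_toLex]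
    rcases lt_trichotomy (k1 a) (k1 b) with h | h | h
    · simp [h]
    · simp [h]
    · simp only [h.not_gt, h.ne']
      simp
      intro hle
      exact absurd hle (not_le.mpr h)
  have h0 : PySem.List.sorted2 xs k1 k2 false
      = xs.foldl (fun acc x => PySem.List.insertBy
          (fun a b => decide (k1 a < k1 b) || (!decide (k1 b < k1 a) && decide (k2 a < k2 b))) x acc) [] := rfl
  rw [h0, hpred, PySem.List.sorted_eq_foldl_insertBy]

-- rank.get(m, 3) of a string outside the fixed order is 3.
lemma rank_of_not_order (m : String) (h : ¬ m ∈ (["cyp", "ugt", "pgp"] : List String)) :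
    PySem.Dict.getD (⟨[("cyp", (0:Int)), ("ugt", (1:Int)), ("pgp", (2:Int))]⟩ : PySem.Dict String Int) m 3 = 3 := by
  simp only [List.mem_cons, List.not_mem_nil, or_false, not_or] at h
  obtain ⟨h1, h2, h3⟩ := h
  have e1 : (("cyp" : String) == m) = false := by simp [Ne.symm h1]
  have e2 : (("ugt" : String) == m) = false := by simp [Ne.symm h2]
  have e3 : (("pgp" : String) == m) = false := by simp [Ne.symm h3]
  simp [PySem.Dict.getD, PySem.Dict.get?, List.find?, e1, e2, e3]

-- pretty.get(m, m) of a string outside the fixed order is m itself.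
lemma pretty_of_not_order (m : String) (h : ¬ m ∈ (["cyp", "ugt", "pgp"] : List String)) :
    PySem.Dict.getD (⟨[("cyp", "CYP"), ("ugt", "UGT"), ("pgp", "P-gp")]⟩ : PySem.Dict String String) m m = m := by
  simp only [List.mem_cons, List.not_mem_nil, or_false, not_or] at h
  obtain ⟨h1, h2, h3⟩ := h
  have e1 : (("cyp" : String) == m) = false := by simp [Ne.symm h1]
  have e2 : (("ugt" : String) == m) = false := by simp [Ne.symm h2]
  have e3 : (("pgp" : String) == m) = false := by simp [Ne.symm h3]
  simp [PySem.Dict.getD, PySem.Dict.get?, List.find?, e1, e2, e3]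

-- The heart of the equivalence: on a duplicate-free list, the single lex-keyed sort is
-- exactly "fixed-order known mechanisms, then the extras sorted alphabetically".
lemma sorted_lex_split (mechs : List String) (hnd : mechs.Nodup) :
    PySem.List.sorted mechs
        (fun m => toLex (PySem.Dict.getD (⟨[("cyp", (0:Int)), ("ugt", (1:Int)), ("pgp", (2:Int))]⟩ : PySem.Dict String Int) m 3, m)) false
      = (["cyp", "ugt", "pgp"] : List String).filter (fun k => PySem.Set.contains mechs k)
        ++ PySem.List.sorted (mechs.filter (fun m => !(PySem.Set.ofList (["cyp", "ugt", "pgp"] : List String)).contains m)) (fun m => m) := by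
  apply PySem.List.sorted_eq_of_perm_of_pairwise_lt
  · -- the right-hand side is a rearrangement of mechs
    have h2 : (PySem.List.sorted (mechs.filter (fun m => !(PySem.Set.ofList (["cyp", "ugt", "pgp"] : List String)).contains m)) (fun m => m)).Perm
        (mechs.filter (fun m => !(PySem.Set.ofList (["cyp", "ugt", "pgp"] : List String)).contains m)) :=
      PySem.List.sorted_perm _ _ _
    have h1 : ((["cyp", "ugt", "pgp"] : List String).filter (fun k => PySem.Set.contains mechs k)).Perm
        (mechs.filter (fun m => (PySem.Set.ofList (["cyp", "ugt", "pgp"] : List String)).contains m)) := by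
      rw [List.perm_ext_iff_of_nodup (List.Nodup.filter _ (by decide)) (List.Nodup.filter _ hnd)]
      intro a
      simp [List.mem_filter, PySem.Set.contains, PySem.Set.ofList, and_comm]
    exact (h1.append h2).trans (List.filter_append_perm _ mechs)
  · -- and its keys are strictly increasing
    rw [List.pairwise_append]
    refine ⟨?_, ?_, ?_⟩
    · -- the three known mechanisms carry the strictly increasing ranks 0 < 1 < 2
      exact List.Pairwise.filter _ (by decide)
    · -- extras: all rank 3, alphabetically sorted and duplicate-free, hence strictly increasing
      have hle := PySem.List.sorted_pairwise (mechs.filter (fun m => !(PySem.Set.ofList (["cyp", "ugt", "pgp"] : List String)).contains m)) (fun m => m)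
      have hnd2 : (PySem.List.sorted (mechs.filter (fun m => !(PySem.Set.ofList (["cyp", "ugt", "pgp"] : List String)).contains m)) (fun m => m)).Nodup :=
        (PySem.List.sorted_perm _ _ _).nodup_iff.mpr (List.Nodup.filter _ hnd)
      refine List.Pairwise.imp_of_mem ?_ (hle.and hnd2)
      intro a b ha hb hab
      have hna : ¬ a ∈ (["cyp", "ugt", "pgp"] : List String) := by
        have := (List.mem_filter.mp ((PySem.List.mem_sorted _ _ _ _).mp ha)).2
        simpa [PySem.Set.contains, PySem.Set.ofList] using this
      have hnb : ¬ b ∈ (["cyp", "ugt", "pgp"] : List String) := by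
        have := (List.mem_filter.mp ((PySem.List.mem_sorted _ _ _ _).mp hb)).2
        simpa [PySem.Set.contains, PySem.Set.ofList] using this
      rw [Prod.Lex.toLex_lt_toLex]
      exact Or.inr ⟨by rw [rank_of_not_order a hna, rank_of_not_order b hnb],
        lt_of_le_of_ne hab.1 hab.2⟩
    · -- every known mechanism (rank ≤ 2) precedes every extra (rank 3)
      intro a ha b hb
      have hna : a ∈ (["cyp", "ugt", "pgp"] : List String) := (List.mem_filter.mp ha).1
      have hnb : ¬ b ∈ (["cyp", "ugt", "pgp"] : List String) := by
        have := (List.mem_filter.mp ((PySem.List.mem_sorted _ _ _ _).mp hb)).2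
        simpa [PySem.Set.contains, PySem.Set.ofList] using this
      rw [Prod.Lex.toLex_lt_toLex]
      refine Or.inl ?_
      rw [rank_of_not_order b hnb]
      simp only [List.mem_cons, List.not_mem_nil, or_false] at hna
      rcases hna with rfl | rfl | rfl <;> (dsimp only; decide)

-- ===== VERDICT (by name: the statement is the Claim_ definition above) =====
theorem label_for_mechs_py_spec : Claim_equal_label_for_mechs_py := by
  intro mechs _ hnd
  show label_for_mechs_py mechs = label_for_mechs_py_alt mechs
  unfold label_for_mechs_py label_for_mechs_py_alt
  dsimp only
  rw [PySem.List.foldl_append_if, sorted2_eq_sorted_lex, sorted_lex_split mechs hnd,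
      List.map_append, List.nil_append]
  have hmap1 : ((["cyp", "ugt", "pgp"] : List String).filter (fun k => PySem.Set.contains mechs k)).map
        (fun m => PySem.Dict.getD (⟨[("cyp", "CYP"), ("ugt", "UGT"), ("pgp", "P-gp")]⟩ : PySem.Dict String String) m m)
      = ((["cyp", "ugt", "pgp"] : List String).filter (fun k => PySem.Set.contains mechs k)).map
        (fun k => (PySem.Dict.get? (⟨[("cyp", "CYP"), ("ugt", "UGT"), ("pgp", "P-gp")]⟩ : PySem.Dict String String) k).getD "") := by
    apply List.map_congr_left
    intro k hk
    have hko : k ∈ (["cyp", "ugt", "pgp"] : List String) := (List.mem_filter.mp hk).1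
    simp only [List.mem_cons, List.not_mem_nil, or_false] at hko
    rcases hko with rfl | rfl | rfl <;> rfl
  have hmap2 : (PySem.List.sorted (mechs.filter (fun m => !(PySem.Set.ofList (["cyp", "ugt", "pgp"] : List String)).contains m)) (fun m => m)).map
        (fun m => PySem.Dict.getD (⟨[("cyp", "CYP"), ("ugt", "UGT"), ("pgp", "P-gp")]⟩ : PySem.Dict String String) m m)
      = PySem.List.sorted (mechs.filter (fun m => !(PySem.Set.ofList (["cyp", "ugt", "pgp"] : List String)).contains m)) (fun m => m) := by
    have : ∀ m ∈ PySem.List.sorted (mechs.filter (fun m => !(PySem.Set.ofList (["cyp", "ugt", "pgp"] : List String)).contains m)) (fun m => m),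
        PySem.Dict.getD (⟨[("cyp", "CYP"), ("ugt", "UGT"), ("pgp", "P-gp")]⟩ : PySem.Dict String String) m m = m := by
      intro m hm
      have hnm : ¬ m ∈ (["cyp", "ugt", "pgp"] : List String) := by
        have := (List.mem_filter.mp ((PySem.List.mem_sorted _ _ _ _).mp hm)).2
        simpa [PySem.Set.contains, PySem.Set.ofList] using this
      exact pretty_of_not_order m hnm
    calc _ = (PySem.List.sorted (mechs.filter (fun m => !(PySem.Set.ofList (["cyp", "ugt", "pgp"] : List String)).contains m)) (fun m => m)).map id :=
          List.map_congr_left this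
      _ = _ := List.map_id _
  rw [hmap1, hmap2]
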